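-- pv_equiv track=rewrite | github.com/maxx06/Algos | Python/ACSL/ACSL2020-2021_Senior3_Contest4.py | combineNums
-- ===== SOURCE A (Python) =====
-- def combineNums(numsThatWork, edges) -> list[int]:
--     x, numsThatWork = numsThatWork, []
--     for i in x:
--         for j in edges:
--             if str(i)[-1] == str(j)[0] and len(list(str(i)[:-1] + j)) == len(list(set(str(i)[:-1] + j))):
--                 numsThatWork.append(str(i)[:-1] + j)
--     for s in numsThatWork:
--         numsThatWork[numsThatWork.index(s)] = int(s)
--     return sorted(list(set(numsThatWork)))
-- ===== SOURCE B (Python) =====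
-- def combineNums(numsThatWork, edges) -> list[int]:
--     buckets = {}
--     for j in edges:
--         if j:  # an empty edge has no first character and can never match
--             buckets.setdefault(j[0], []).append(j)
--     results = set()
--     for i in numsThatWork:
--         s = str(i)
--         prefix, last = s[:-1], s[-1]
--         for j in buckets.get(last, []):
--             cand = prefix + j
--             if len(set(cand)) == len(cand):
--                 results.add(int(cand))
--     return sorted(results)
-- ===== Notes on version B (the rewrite author's own statement) =====
-- stated objective: faster
-- what changed: B buckets the (nonempty) edges by first character in a dict built once and collects matches directly into a set of ints, replacing A's scan of all edges for every number, A's quadratic index-based in-place string-to-int conversion pass, and the extra string list.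
import Mathlib
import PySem

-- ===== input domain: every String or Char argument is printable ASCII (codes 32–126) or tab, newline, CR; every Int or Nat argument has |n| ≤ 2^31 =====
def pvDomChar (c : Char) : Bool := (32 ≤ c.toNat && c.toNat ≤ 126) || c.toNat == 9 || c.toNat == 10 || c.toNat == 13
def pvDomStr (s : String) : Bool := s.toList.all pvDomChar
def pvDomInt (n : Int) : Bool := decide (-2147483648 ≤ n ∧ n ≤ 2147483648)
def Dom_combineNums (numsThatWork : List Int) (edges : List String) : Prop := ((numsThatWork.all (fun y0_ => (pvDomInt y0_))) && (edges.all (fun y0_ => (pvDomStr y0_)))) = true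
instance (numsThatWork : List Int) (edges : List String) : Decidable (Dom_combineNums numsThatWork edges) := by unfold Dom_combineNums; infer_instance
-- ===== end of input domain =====

-- B buckets the nonempty edges by first character in a dict and collects results in a set directly,
-- removing A's scan over all edges per number and A's quadratic index-based int-conversion pass (objective: faster).


-- ===== PORT A =====
-- The element type of A's mutated list, which holds strings first and ints after conversion.
abbrev pvSI : Type := Sum (List Char) Int

-- int(s) applied to a list element (int(s) on an already-converted int is the identity);
-- ofChars? is exact for int(str); none = ValueError, excluded by Pre_.
def pvIntOf : pvSI → Int
  | Sum.inl s => (PySem.Int.ofChars? s).getD 0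
  | Sum.inr n => n

-- numsThatWork[numsThatWork.index(s)] = int(s); the none branch is Python's ValueError,
-- unreachable because s was read from the list itself.
def pvConvStep (lst : List pvSI) (s : pvSI) : List pvSI :=
  -- Python's '==' used by list.index is value equality: the DecidableEq-induced BEq
  match @PySem.List.index? pvSI instBEqOfDecidableEq lst s with
  | some n => lst.set n (Sum.inr (pvIntOf s))
  | none => lst

-- 'for s in numsThatWork:' over the list being mutated in place: the length never changes,
-- so CPython reads positions 0..len-1 of the current list; exact step-for-step port.
def pvConvGo : Nat → Nat → List pvSI → List pvSI
  | 0, _, lst => lst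
  | fuel+1, k, lst => pvConvGo fuel (k+1) (pvConvStep lst (lst.getD k (Sum.inl [])))

def combineNums (numsThatWork : List Int) (edges : List String) : List Int :=
  -- x, numsThatWork = numsThatWork, []
  let x := numsThatWork
  let acc : List (List Char) := x.foldl (fun acc i =>
    edges.foldl (fun acc j =>
      if (PySem.List.pyGetD (PySem.Int.toChars i) (-1) ' ' == PySem.List.pyGetD j.toList 0 ' ')
          && ((PySem.List.slice (PySem.Int.toChars i) none (some (-1)) ++ j.toList).length
              == (PySem.Set.ofList (PySem.List.slice (PySem.Int.toChars i) none (some (-1)) ++ j.toList)).length)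
      then acc ++ [PySem.List.slice (PySem.Int.toChars i) none (some (-1)) ++ j.toList]
      else acc) acc) []
  -- for s in numsThatWork: numsThatWork[numsThatWork.index(s)] = int(s)
  let conv := pvConvGo acc.length 0 (acc.map Sum.inl)
  -- the list now holds only ints; read them back out of the Sum
  let ints := conv.map pvIntOf
  -- sorted(list(set(...))): sorted of a set without key is order-insensitive
  PySem.List.sorted (PySem.Set.ofList ints) (fun v => v) false

-- ===== PORT B =====
def combineNums_alt (numsThatWork : List Int) (edges : List String) : List Int :=
  -- if j: buckets.setdefault(j[0], []).append(j)
  let buckets : PySem.Dict Char (List String) :=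
    edges.foldl (fun d j =>
      if !j.toList.isEmpty then d.modify (PySem.List.pyGetD j.toList 0 ' ') [] (· ++ [j]) else d)
      PySem.Dict.empty
  let results : PySem.Set Int :=
    numsThatWork.foldl (fun r i =>
      let s := PySem.Int.toChars i
      let pre := PySem.List.slice s none (some (-1))
      let last := PySem.List.pyGetD s (-1) ' '
      (buckets.getD last []).foldl (fun r j =>
        let cand := pre ++ j.toList
        if (PySem.Set.ofList cand).length == cand.length
        then PySem.Set.add r ((PySem.Int.ofChars? cand).getD 0)
        else r) r) PySem.Set.empty
  PySem.List.sorted results (fun v => v) false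

-- ===== PRECONDITION & SPEC =====
-- Pre_ excludes exactly the inputs where Python A raises: when numsThatWork is nonempty, an empty
-- edge string (IndexError on j[0] inside the inner loop), and a matching pair whose concatenated
-- candidate is not int()-parseable (ValueError on int(s)).
def Pre_combineNums (numsThatWork : List Int) (edges : List String) : Prop :=
  (numsThatWork.all (fun i => edges.all (fun j =>
      !j.toList.isEmpty
        && (let cand := (PySem.Int.toChars i).dropLast ++ j.toList
            !(((PySem.Int.toChars i).getLast? == j.toList.head?)
                && (cand.length == (PySem.Set.ofList cand).length))
              || (PySem.Int.ofChars? cand).isSome)))) = true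
instance (numsThatWork : List Int) (edges : List String) : Decidable (Pre_combineNums numsThatWork edges) := by unfold Pre_combineNums; infer_instance

def pvWitness_combineNums : List Int × List String := ([12, 23, 7], ["25", "34"])

def Spec_combineNums (numsThatWork : List Int) (edges : List String) (out : List Int) : Prop := out = combineNums_alt numsThatWork edges
instance (numsThatWork : List Int) (edges : List String) (out : List Int) : Decidable (Spec_combineNums numsThatWork edges out) := by unfold Spec_combineNums; infer_instance

-- ===== CLAIM (what is proved, stated in full; the proofs are below) =====
def Claim_equal_combineNums : Prop := ∀ (numsThatWork : List Int) (edges : List String), Dom_combineNums numsThatWork edges → Pre_combineNums numsThatWork edges → Spec_combineNums numsThatWork edges (combineNums numsThatWork edges)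

-- ===== LEMMAS AND PROOFS =====

-- shorthand for the common subexpressions of the two ports (proof-only)
def pvKey (j : String) : Char := PySem.List.pyGetD j.toList 0 ' '
def pvLast (i : Int) : Char := PySem.List.pyGetD (PySem.Int.toChars i) (-1) ' '
def pvCand (i : Int) (j : String) : List Char :=
  PySem.List.slice (PySem.Int.toChars i) none (some (-1)) ++ j.toList
def pvF (i : Int) (j : String) : Int := (PySem.Int.ofChars? (pvCand i j)).getD 0
def pvPredA (i : Int) (j : String) : Bool :=
  (pvLast i == pvKey j)
    && ((pvCand i j).length == (PySem.Set.ofList (pvCand i j)).length)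
-- the ints contributed by one number i, in A's (and B's) order
def pvLi (edges : List String) (i : Int) : List Int := (edges.filter (pvPredA i)).map (pvF i)

-- A's in-place conversion loop: when the first `done.length` cells hold ints and the rest
-- strings, each step converts exactly the next cell (the index-scan skips the int prefix).
theorem pvConvGo_spec : ∀ (todo : List (List Char)) (done : List Int),
    pvConvGo todo.length done.length (done.map Sum.inr ++ todo.map Sum.inl)
      = (done ++ todo.map (fun s => (PySem.Int.ofChars? s).getD 0)).map Sum.inr := by
  intro todo
  induction todo with
  | nil =>
    intro done
    simp only [List.length_nil, List.map_nil, List.append_nil, pvConvGo]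
  | cons s rest ih =>
    intro done
    show pvConvGo (rest.length + 1) done.length _ = _
    rw [pvConvGo]
    have hget : (done.map Sum.inr ++ (s :: rest).map Sum.inl).getD done.length (Sum.inl [])
        = (Sum.inl s : pvSI) := by
      simp [List.getD]
    rw [hget]
    have hidx : @PySem.List.index? pvSI instBEqOfDecidableEq (done.map Sum.inr ++ (s :: rest).map Sum.inl)
        (Sum.inl s : pvSI) = some done.length := by
      rw [@PySem.List.index?_eq_some_iff pvSI instBEqOfDecidableEq inferInstance]
      exact ⟨done.map Sum.inr, rest.map Sum.inl, by simp, by simp, by simp⟩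
    have hstep : pvConvStep (done.map Sum.inr ++ (s :: rest).map Sum.inl) (Sum.inl s)
        = (done ++ [(PySem.Int.ofChars? s).getD 0]).map Sum.inr ++ rest.map Sum.inl := by
      rw [pvConvStep, hidx]
      simp [pvIntOf]
    rw [hstep]
    have := ih (done ++ [(PySem.Int.ofChars? s).getD 0])
    simpa using this

-- A collects, number by number, the parsed candidates of the matching unique-char edges.
theorem combineNums_eq (nums : List Int) (edges : List String) :
    combineNums nums edges
      = PySem.List.sorted (PySem.Set.ofList (nums.flatMap (pvLi edges))) (fun v => v) false := by
  simp only [combineNums]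
  show PySem.List.sorted (PySem.Set.ofList ((pvConvGo
      (nums.foldl (fun acc i => edges.foldl (fun acc j =>
          if pvPredA i j then acc ++ [pvCand i j] else acc) acc) []).length 0
      ((nums.foldl (fun acc i => edges.foldl (fun acc j =>
          if pvPredA i j then acc ++ [pvCand i j] else acc) acc) []).map Sum.inl)).map pvIntOf))
    (fun v => v) false = _
  rw [show (fun (acc : List (List Char)) (i : Int) =>
        edges.foldl (fun acc j =>
          if pvPredA i j then acc ++ [pvCand i j] else acc) acc)
      = fun acc i => acc ++ (edges.filter (pvPredA i)).map (pvCand i) from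
    funext fun acc => funext fun i => PySem.List.foldl_append_if _ _ _ _]
  rw [PySem.List.foldl_append_eq_flatMap, List.nil_append]
  have hconv := pvConvGo_spec (nums.flatMap fun i => (edges.filter (pvPredA i)).map (pvCand i)) []
  simp only [List.map_nil, List.nil_append, List.length_nil] at hconv
  rw [hconv]
  simp only [List.map_map, List.map_flatMap, Function.comp_def, pvIntOf]
  rw [show (fun a : Int => List.map (fun x => (PySem.Int.ofChars? (pvCand a x)).getD 0)
        (List.filter (pvPredA a) edges)) = pvLi edges from funext fun a => rfl]

-- B's bucket dict: looking up c yields exactly the nonempty edges whose first character is c, in order.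
theorem pvBucket (edges : List String) (c : Char) :
    (edges.foldl (fun d j =>
        if !j.toList.isEmpty then d.modify (pvKey j) [] (· ++ [j]) else d) PySem.Dict.empty).getD c []
      = edges.filter (fun j => !j.toList.isEmpty && pvKey j == c) := by
  induction edges using List.reverseRecOn with
  | nil => simp [PySem.Dict.getD, PySem.Dict.get?, PySem.Dict.empty]
  | append_singleton rest j ih =>
    rw [List.foldl_append, List.foldl_cons, List.foldl_nil, List.filter_append]
    by_cases hj : j.toList.isEmpty
    · rw [if_neg (by simp [hj]), ih]
      simp [hj]
    · simp only [hj, Bool.not_false, if_true, Bool.true_and, List.filter_cons, List.filter_nil]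
      by_cases hc : pvKey j = c
      · subst hc
        rw [PySem.Dict.getD_modify_self, ih]
        simp
      · rw [PySem.Dict.getD_modify_of_ne _ _ _ (by simpa using Ne.symm hc), ih]
        simp [hc]

-- B accumulates the same per-number contributions into the result set
-- (under the hypothesis, supplied by Pre_ when nums ≠ [], that every edge is nonempty).
theorem combineNums_alt_eq (nums : List Int) (edges : List String)
    (hne : ∀ j ∈ edges, j.toList.isEmpty = false) :
    combineNums_alt nums edges
      = PySem.List.sorted (PySem.Set.ofList (nums.flatMap (pvLi edges))) (fun v => v) false := by
  simp only [combineNums_alt]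
  show PySem.List.sorted (nums.foldl (fun r i =>
      ((edges.foldl (fun d j =>
          if !j.toList.isEmpty then d.modify (pvKey j) [] (· ++ [j]) else d)
        PySem.Dict.empty).getD (pvLast i) []).foldl
        (fun r j => if (PySem.Set.ofList (pvCand i j)).length == (pvCand i j).length
                    then PySem.Set.add r (pvF i j) else r) r)
    PySem.Set.empty) (fun v => v) false = _
  have hb : ∀ i : Int,
      (edges.foldl (fun d j =>
          if !j.toList.isEmpty then d.modify (pvKey j) [] (· ++ [j]) else d)
        PySem.Dict.empty).getD (pvLast i) []
        = edges.filter (fun j => pvKey j == pvLast i) := by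
    intro i
    rw [pvBucket edges (pvLast i)]
    exact List.filter_congr (fun j hj => by simp [hne j hj])
  simp only [hb]
  have houter : (fun (r : PySem.Set Int) (i : Int) =>
        (edges.filter (fun j => pvKey j == pvLast i)).foldl (fun r j =>
          if (PySem.Set.ofList (pvCand i j)).length == (pvCand i j).length
          then PySem.Set.add r (pvF i j) else r) r)
      = fun r i => (pvLi edges i).foldl PySem.Set.add r := by
    funext r i
    rw [PySem.List.foldl_if_eq_foldl_filter, List.filter_filter]
    rw [List.filter_congr (q := pvPredA i) (fun j _ => by
      simp only [pvPredA]
      rw [show ((pvKey j == pvLast i) = (pvLast i == pvKey j)) from Bool.beq_comm,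
        show (((PySem.Set.ofList (pvCand i j)).length == (pvCand i j).length)
            = ((pvCand i j).length == (PySem.Set.ofList (pvCand i j)).length)) from Bool.beq_comm,
        Bool.and_comm])]
    rw [← List.foldl_map (f := pvF i) (g := PySem.Set.add)]
    rfl
  rw [houter]
  rw [← List.foldl_flatMap]
  rfl

-- ===== VERDICT (by name: the statement is the Claim_ definition above) =====
theorem combineNums_spec : Claim_equal_combineNums := by
  intro nums edges _ hpre
  show combineNums nums edges = combineNums_alt nums edges
  cases nums with
  | nil =>
    rfl
  | cons n rest =>
    have hne : ∀ j ∈ edges, j.toList.isEmpty = false := by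
      simp only [Pre_combineNums, List.all_eq_true, Bool.and_eq_true] at hpre
      intro j hj
      have := (hpre n List.mem_cons_self j hj).1
      simpa using this
    rw [combineNums_eq, combineNums_alt_eq _ _ hne]
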